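-- pv_equiv track=rewrite | github.com/ishwar6/DS | 450/arrays.py | oddsums
-- ===== SOURCE A (Python) =====
-- def oddsums(n):
--     total = 0
--     result = []
--     for i in range(1, n+1):
--         odd = 2*i-1
--         total = total+odd
--         result.append(total)
--     return result
-- ===== SOURCE B (Python) =====
-- def oddsums(n):
--     return [i * i for i in range(1, n + 1)]
-- ===== Notes on version B (the rewrite author's own statement) =====
-- stated objective: simpler
-- what changed: Replaced the running-total recurrence (adding the i-th odd number each step) with the per-element closed form i*i computed independently in a list comprehension, eliminating the accumulator and the append loop.
import Mathlib
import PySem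

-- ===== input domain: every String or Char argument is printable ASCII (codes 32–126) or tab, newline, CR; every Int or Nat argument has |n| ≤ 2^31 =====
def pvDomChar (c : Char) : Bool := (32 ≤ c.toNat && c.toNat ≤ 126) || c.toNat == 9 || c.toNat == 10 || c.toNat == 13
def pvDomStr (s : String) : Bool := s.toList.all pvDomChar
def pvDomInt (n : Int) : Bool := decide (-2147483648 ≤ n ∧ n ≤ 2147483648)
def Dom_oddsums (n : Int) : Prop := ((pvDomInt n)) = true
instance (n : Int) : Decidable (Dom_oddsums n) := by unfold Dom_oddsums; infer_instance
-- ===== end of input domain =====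

-- B replaces A's running-total accumulator with the independent closed form i*i per element (objective: simpler).

-- ===== PORT A =====
def oddsums (n : Int) : List Int :=
  let st := (PySem.List.pyRange 1 (n + 1) 1).foldl
    (fun (st : Int × List Int) i =>
      let odd := 2 * i - 1
      let total := st.1 + odd
      (total, st.2 ++ [total]))
    (0, [])
  st.2

-- ===== PORT B =====
def oddsums_alt (n : Int) : List Int :=
  (PySem.List.pyRange 1 (n + 1) 1).map (fun i => i * i)

-- ===== PRECONDITION & SPEC =====
def Spec_oddsums (n : Int) (out : List Int) : Prop := out = oddsums_alt n
instance (n : Int) (out : List Int) : Decidable (Spec_oddsums n out) := by unfold Spec_oddsums; infer_instance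

-- ===== CLAIM (what is proved, stated in full; the proofs are below) =====
def Claim_equal_oddsums : Prop := ∀ (n : Int), Dom_oddsums n → Spec_oddsums n (oddsums n)

-- ===== LEMMAS AND PROOFS =====

-- Invariant: folding A's step over range(1, m+1) from ((a)², squares so far) yields all squares up to m².
theorem oddsums_fold (m : Int) (h : 0 ≤ m) :
    (PySem.List.pyRange 1 (m + 1) 1).foldl
      (fun (st : Int × List Int) i =>
        let odd := 2 * i - 1
        let total := st.1 + odd
        (total, st.2 ++ [total]))
      (0, [])
    = (m * m, (PySem.List.pyRange 1 (m + 1) 1).map (fun i => i * i)) := by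
  induction m, h using Int.le_induction with
  | base =>
      rw [PySem.List.pyRange_one_eq_nil (by norm_num)]
      simp
  | succ m hm ih =>
      rw [PySem.List.pyRange_one_succ_right (by omega), List.foldl_append, ih]
      simp
      ring_nf

theorem oddsums_spec' (n : Int) : oddsums n = oddsums_alt n := by
  unfold oddsums oddsums_alt
  by_cases h : 0 ≤ n
  · rw [oddsums_fold n h]
  · rw [PySem.List.pyRange_one_eq_nil (by omega)]
    simp

-- ===== VERDICT (by name: the statement is the Claim_ definition above) =====
theorem oddsums_spec : Claim_equal_oddsums := by
  intro n _
  exact oddsums_spec' n
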